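-- pv_equiv track=rewrite | github.com/helpfuldolphin/mathledger | ops/promote_basis.py | summarize_output
-- ===== SOURCE A (Python) =====
-- def summarize_output(text: str, max_lines: int = 6) -> str:
--     if not text:
--         return ""
--     lines = [line.strip() for line in text.strip().splitlines() if line.strip()]
--     if not lines:
--         return ""
--     if len(lines) <= max_lines:
--         return "\n".join(lines)
--     return "\n".join(lines[-max_lines:])
-- ===== SOURCE B (Python) =====
-- def summarize_output(text: str, max_lines: int = 6) -> str:
--     buf = []
--     for line in reversed(text.strip().splitlines()):
--         s = line.strip()
--         if not s:
--             continue
--         buf.append(s)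
--         if len(buf) >= max_lines:
--             break
--     return "\n".join(reversed(buf))
-- ===== Notes on version B (the rewrite author's own statement) =====
-- stated objective: alternative
-- what changed: Instead of building the full filtered line list and then slicing its tail, B scans the lines backwards, keeping stripped non-empty lines and stopping as soon as max_lines are collected, then reverses the bounded buffer and joins.
-- outside the precondition, e.g. on summarize_output('a\nb', 0): A returns 'a\nb', B returns 'b'; on summarize_output('a\nb\nc', -1): A returns 'b\nc', B returns 'c'
import Mathlib
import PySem

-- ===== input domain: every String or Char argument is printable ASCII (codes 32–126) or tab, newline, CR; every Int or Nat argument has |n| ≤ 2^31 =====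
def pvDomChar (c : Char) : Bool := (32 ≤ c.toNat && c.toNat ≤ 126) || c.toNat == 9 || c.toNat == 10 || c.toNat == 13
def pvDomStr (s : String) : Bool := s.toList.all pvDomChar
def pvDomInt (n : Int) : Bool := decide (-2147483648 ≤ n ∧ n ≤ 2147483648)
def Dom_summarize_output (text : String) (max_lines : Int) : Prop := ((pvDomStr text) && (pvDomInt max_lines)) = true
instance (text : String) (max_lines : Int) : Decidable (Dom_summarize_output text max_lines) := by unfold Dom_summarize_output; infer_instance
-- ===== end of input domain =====

-- B replaces "build the full filtered line list, then slice its tail" by a backward scan over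
-- the lines that stops as soon as max_lines kept lines are collected (alternative decomposition;
-- same asymptotic cost).

-- ===== PORT A =====
def summarize_output (text : String) (max_lines : Int) : String :=
  if text = "" then ""
  else
    let lines := ((PySem.Str.splitlines (PySem.Str.strip text)).map PySem.Str.strip).filter
      (fun l => l != "")
    if lines = [] then ""
    else if (lines.length : Int) ≤ max_lines then PySem.Str.join "\n" lines
    else PySem.Str.join "\n" (PySem.List.slice lines (some (-max_lines)) none)

-- ===== PORT B =====
-- the backward loop of Source B: strip each line, skip empty, append, break once full
def soLoop (m : Int) : List String → List String → List String
  | buf, [] => buf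
  | buf, line :: rest =>
      let s := PySem.Str.strip line
      if s = "" then soLoop m buf rest
      else
        let buf' := buf ++ [s]
        if m ≤ (buf'.length : Int) then buf' else soLoop m buf' rest

def summarize_output_alt (text : String) (max_lines : Int) : String :=
  PySem.Str.join "\n"
    ((soLoop max_lines [] ((PySem.Str.splitlines (PySem.Str.strip text)).reverse)).reverse)

-- ===== PRECONDITION & SPEC =====
-- Pre_ restricts to the natural domain max_lines ≥ 1: a non-positive line budget is outside the
-- function's purpose, and there A's slice lines[-max_lines:] accidentally returns leading/all lines.
def Pre_summarize_output (text : String) (max_lines : Int) : Prop := 1 ≤ max_lines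
instance (text : String) (max_lines : Int) : Decidable (Pre_summarize_output text max_lines) := by
  unfold Pre_summarize_output; infer_instance

def pvWitness_summarize_output : String × Int := ("alpha\n\n  beta  \ngamma", 2)

def Spec_summarize_output (text : String) (max_lines : Int) (out : String) : Prop :=
  out = summarize_output_alt text max_lines
instance (text : String) (max_lines : Int) (out : String) :
    Decidable (Spec_summarize_output text max_lines out) := by
  unfold Spec_summarize_output; infer_instance

-- ===== CLAIM (what is proved, stated in full; the proofs are below) =====
def Claim_equal_summarize_output : Prop := ∀ (text : String) (max_lines : Int),
  Dom_summarize_output text max_lines → Pre_summarize_output text max_lines →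
  Spec_summarize_output text max_lines (summarize_output text max_lines)

-- ===== LEMMAS AND PROOFS =====

-- the filtered stripped lines both programs are about
def soF (xs : List String) : List String :=
  (xs.map PySem.Str.strip).filter (fun l => l != "")

theorem soF_reverse (xs : List String) : soF xs.reverse = (soF xs).reverse := by
  simp [soF, List.filter_reverse]

-- loop invariant: while the buffer is not full, the loop appends the next kept lines
theorem soLoop_spec (m : Int) (xs : List String) :
    ∀ buf : List String, (buf.length : Int) < m →
      soLoop m buf xs = buf ++ (soF xs).take (m - buf.length).toNat := by
  induction xs with
  | nil => intro buf h; simp [soLoop, soF]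
  | cons x rest ih =>
    intro buf h
    by_cases hs : PySem.Str.strip x = ""
    · simpa [soLoop, hs, soF] using ih buf h
    · have hF : soF (x :: rest) = PySem.Str.strip x :: soF rest := by
        simp [soF, hs]
      by_cases hfull : m ≤ ((buf ++ [PySem.Str.strip x]).length : Int)
      · have hk : (m - buf.length).toNat = 1 := by
          simp at hfull; omega
        simp only [soLoop, if_neg hs, if_pos hfull, hF, hk, List.take_succ_cons, List.take_zero]
      · have hlt : ((buf ++ [PySem.Str.strip x]).length : Int) < m := by
          simp at hfull ⊢; omega
        have := ih (buf ++ [PySem.Str.strip x]) hlt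
        have hk : (m - buf.length).toNat = (m - (buf ++ [PySem.Str.strip x]).length).toNat + 1 := by
          simp at hlt ⊢; omega
        simp only [soLoop, if_neg hs, if_neg hfull, this, hF, hk, List.take_succ_cons]
        simp

-- both programs compute the last min(m, length) filtered lines, i.e. drop (length - m.toNat)
theorem alt_eq_drop (text : String) (m : Int) (hm : 1 ≤ m) :
    summarize_output_alt text m =
      PySem.Str.join "\n"
        ((soF (PySem.Str.splitlines (PySem.Str.strip text))).drop
          ((soF (PySem.Str.splitlines (PySem.Str.strip text))).length - m.toNat)) := by
  have h0 : ((([] : List String)).length : Int) < m := by simp; omega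
  have hloop := soLoop_spec m ((PySem.Str.splitlines (PySem.Str.strip text)).reverse) [] h0
  simp only [List.nil_append, List.length_nil, Nat.cast_zero, Int.sub_zero] at hloop
  rw [summarize_output_alt, hloop, soF_reverse, List.take_reverse, List.reverse_reverse]

theorem a_eq_drop (text : String) (m : Int) (hm : 1 ≤ m) :
    summarize_output text m =
      PySem.Str.join "\n"
        ((soF (PySem.Str.splitlines (PySem.Str.strip text))).drop
          ((soF (PySem.Str.splitlines (PySem.Str.strip text))).length - m.toNat)) := by
  rw [summarize_output]
  by_cases ht : text = ""
  · subst ht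
    have hnil : soF (PySem.Str.splitlines (PySem.Str.strip "")) = [] := by decide
    simp [hnil]
    decide
  · simp only [if_neg ht]
    set L := soF (PySem.Str.splitlines (PySem.Str.strip text)) with hL
    by_cases hLnil : L = []
    · simp [soF] at hL
      simp [← hL, hLnil]
      decide
    · have hLdef : ((PySem.Str.splitlines (PySem.Str.strip text)).map PySem.Str.strip).filter
          (fun l => l != "") = L := by rw [hL, soF]
      rw [hLdef]
      simp only [if_neg hLnil]
      by_cases hle : (L.length : Int) ≤ m
      · have : L.length - m.toNat = 0 := by omega
        rw [this, List.drop_zero, if_pos hle]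
      · rw [if_neg hle]
        have hmn : m = ((m.toNat : Nat) : Int) := by omega
        have hpos : 0 < m.toNat := by omega
        rw [hmn, PySem.List.slice_from_neg_natCast _ _ hpos, Int.toNat_natCast]

-- ===== VERDICT (by name: the statement is the Claim_ definition above) =====
theorem summarize_output_spec : Claim_equal_summarize_output := by
  intro text m _ hpre
  unfold Spec_summarize_output
  rw [a_eq_drop text m hpre, alt_eq_drop text m hpre]
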